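-- pv_equiv track=rewrite | github.com/wisent-ai/wisent | wisent/core/utils/layer_combinations.py | get_layer_combinations
-- ===== SOURCE A (Python) =====
-- from itertools import combinations
-- from typing import List
--
-- def get_layer_combinations(num_layers: int, max_combo_size: int, single_and_all_only: bool = True) -> List[List[int]]:
--     """
--     Generate layer combinations up to a maximum combination size.
--
--     Args:
--         num_layers: Total number of layers in the model
--         max_combo_size: Maximum number of layers in a combination (e.g., 3)
--         single_and_all_only: If True, only return single layers and all layers together
--                              (skip 2-layer, 3-layer combinations). Default: True
--
--     Returns:
--         List of layer combinations:
--         - All layers together: [0, 1, 2, ..., num_layers-1]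
--         - All individual layers: [0], [1], ..., [num_layers-1]
--         - (if not single_and_all_only) All combinations of 2, 3, ..., max_combo_size layers
--     """
--     all_layers = list(range(num_layers))
--     result = []
--
--     # All layers together (always included)
--     result.append(all_layers)
--
--     # All individual layers
--     for layer in all_layers:
--         result.append([layer])
--
--     # All combinations of 2, 3, ..., max_combo_size layers (unless single_and_all_only)
--     if not single_and_all_only:
--         for r in range(2, max_combo_size + 1):
--             for combo in combinations(all_layers, r):
--                 result.append(list(combo))
--
--     return result
-- ===== SOURCE B (Python) =====
-- def get_layer_combinations(num_layers: int, max_combo_size: int, single_and_all_only: bool = True):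
--     all_layers = list(range(num_layers))
--
--     def combos(start, k, acc):
--         # recursive backtracking: emit acc when k hits 0, else pick each next index
--         if k == 0:
--             yield acc
--         else:
--             for i in range(start, num_layers):
--                 yield from combos(i + 1, k - 1, acc + [i])
--
--     extras = [] if single_and_all_only else [
--         c for r in range(2, max_combo_size + 1) for c in combos(0, r, [])
--     ]
--     return [all_layers] + [[layer] for layer in all_layers] + extras
-- ===== Notes on version B (the rewrite author's own statement) =====
-- stated objective: alternative
-- what changed: Replaces the itertools.combinations library call and the append-loops with a hand-rolled recursive backtracking generator over start indices plus list comprehensions, emitting the same lexicographic sequence.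
import Mathlib
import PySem

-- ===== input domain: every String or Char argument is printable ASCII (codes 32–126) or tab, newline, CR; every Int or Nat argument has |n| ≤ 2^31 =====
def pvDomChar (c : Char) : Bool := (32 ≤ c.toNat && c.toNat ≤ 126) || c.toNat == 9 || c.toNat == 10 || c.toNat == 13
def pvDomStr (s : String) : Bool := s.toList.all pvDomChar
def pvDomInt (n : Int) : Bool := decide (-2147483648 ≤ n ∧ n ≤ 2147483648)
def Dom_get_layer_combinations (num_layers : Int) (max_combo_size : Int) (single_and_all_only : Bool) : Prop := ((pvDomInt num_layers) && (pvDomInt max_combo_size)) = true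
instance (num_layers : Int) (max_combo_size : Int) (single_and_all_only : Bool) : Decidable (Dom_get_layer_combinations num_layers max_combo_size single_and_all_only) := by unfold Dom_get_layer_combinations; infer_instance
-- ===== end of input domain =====

-- B replaces the itertools.combinations call and the append-loops with a recursive
-- backtracking generator over start indices plus list comprehensions (alternative, same cost).

-- ===== PORT A =====
-- itertools.combinations(xs, r) in lexicographic order (the library call, ported as the
-- standard structural recursion producing exactly its output sequence)
def combinationsA (xs : List Int) (r : Nat) : List (List Int) :=
  match r, xs with
  | 0, _ => [[]]
  | _ + 1, [] => []
  | r + 1, x :: rest => (combinationsA rest r).map (fun c => x :: c) ++ combinationsA rest (r + 1)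

def get_layer_combinations (num_layers : Int) (max_combo_size : Int) (single_and_all_only : Bool) : List (List Int) :=
  let all_layers := PySem.List.pyRange 0 num_layers 1
  let result : List (List Int) := []
  let result := result ++ [all_layers]
  let result := all_layers.foldl (fun res layer => res ++ [[layer]]) result
  if !single_and_all_only then
    (PySem.List.pyRange 2 (max_combo_size + 1) 1).foldl
      (fun res r => (combinationsA all_layers r.toNat).foldl (fun res combo => res ++ [combo]) res)
      result
  else result

-- ===== PORT B =====
-- recursive backtracking generator: choose each next index from start..num_layers-1
def combosB (num_layers : Int) (start : Int) (k : Nat) (acc : List Int) : List (List Int) :=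
  match k with
  | 0 => [acc]
  | k + 1 =>
    (PySem.List.pyRange start num_layers 1).foldl
      (fun res i => res ++ combosB num_layers (i + 1) k (acc ++ [i])) []

def get_layer_combinations_alt (num_layers : Int) (max_combo_size : Int) (single_and_all_only : Bool) : List (List Int) :=
  let all_layers := PySem.List.pyRange 0 num_layers 1
  let extras : List (List Int) :=
    if single_and_all_only then []
    else (PySem.List.pyRange 2 (max_combo_size + 1) 1).flatMap
           (fun r => combosB num_layers 0 r.toNat [])
  all_layers :: (all_layers.map (fun layer => [layer]) ++ extras)

-- ===== PRECONDITION & SPEC =====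
def Spec_get_layer_combinations (num_layers : Int) (max_combo_size : Int) (single_and_all_only : Bool) (out : List (List Int)) : Prop := out = get_layer_combinations_alt num_layers max_combo_size single_and_all_only
instance (num_layers : Int) (max_combo_size : Int) (single_and_all_only : Bool) (out : List (List Int)) : Decidable (Spec_get_layer_combinations num_layers max_combo_size single_and_all_only out) := by unfold Spec_get_layer_combinations; infer_instance

-- ===== CLAIM (what is proved, stated in full; the proofs are below) =====
def Claim_equal_get_layer_combinations : Prop := ∀ (num_layers : Int) (max_combo_size : Int) (single_and_all_only : Bool), Dom_get_layer_combinations num_layers max_combo_size single_and_all_only → Spec_get_layer_combinations num_layers max_combo_size single_and_all_only (get_layer_combinations num_layers max_combo_size single_and_all_only)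

-- ===== LEMMAS AND PROOFS =====

-- the backtracking generator from `start` produces exactly the combinations of the
-- remaining range, each prefixed by the accumulator
theorem combosB_eq (num_layers start : Int) (k : Nat) (acc : List Int) :
    combosB num_layers start k acc
      = (combinationsA (PySem.List.pyRange start num_layers 1) k).map (fun c => acc ++ c) := by
  match k with
  | 0 => simp [combosB, combinationsA]
  | k + 1 =>
    rw [combosB, PySem.List.foldl_append_eq_flatMap]
    by_cases h : start < num_layers
    · rw [PySem.List.pyRange_one_cons h]
      have h1 := combosB_eq num_layers (start + 1) k (acc ++ [start])
      have h2 : (PySem.List.pyRange (start + 1) num_layers 1).flatMap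
            (fun i => combosB num_layers (i + 1) k (acc ++ [i]))
          = combosB num_layers (start + 1) (k + 1) acc := by
        rw [combosB, PySem.List.foldl_append_eq_flatMap]; simp
      have h3 := combosB_eq num_layers (start + 1) (k + 1) acc
      simp only [List.flatMap_cons, List.nil_append, h1, h2, h3, combinationsA]
      simp [Function.comp_def]
    · rw [PySem.List.pyRange_one_eq_nil (by omega)]
      simp [combinationsA]
termination_by (k, (num_layers - start).toNat)
decreasing_by
  all_goals first
    | exact Prod.Lex.left _ _ (by omega)
    | exact Prod.Lex.right _ (by omega)

-- ===== VERDICT (by name: the statement is the Claim_ definition above) =====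
theorem get_layer_combinations_spec : Claim_equal_get_layer_combinations := by
  intro num_layers max_combo_size single_and_all_only _
  unfold Spec_get_layer_combinations get_layer_combinations get_layer_combinations_alt
  simp only [PySem.List.foldl_append_singleton_eq_map]
  cases single_and_all_only with
  | true => simp
  | false =>
    simp only [Bool.not_false, if_true]
    have : ∀ r : Int, combosB num_layers 0 r.toNat [] =
        combinationsA (PySem.List.pyRange 0 num_layers 1) r.toNat := by
      intro r; rw [combosB_eq]; simp
    rw [List.flatMap_congr (fun r _ => this r)]
    · simp [List.flatMap_def]
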